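-- pv_equiv track=rewrite | github.com/NIKHILKUMARREDDY28/PYTHON_CODES | nikhil/Practice/Choco.py | func
-- ===== SOURCE A (Python) =====
-- def func(stri,arr):
--     n = len(stri)
--     dic = {}
--     for i in range(n):
--         if stri[i] in dic:
--             dic[stri[i]] = max(dic[stri[i]],arr[i])
--         else:
--             dic[stri[i]] = arr[i]
--     return sum(arr) - sum(dic.values())
-- ===== SOURCE B (Python) =====
-- def func(stri, arr):
--     total = sum(arr)
--     seen = []
--     for c in stri:
--         if c not in seen:
--             seen.append(c)
--     best = 0
--     for c in seen:
--         m = None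
--         for i in range(len(stri)):
--             if stri[i] == c:
--                 v = arr[i]
--                 if m is None or v > m:
--                     m = v
--         best += m
--     return total - best
-- ===== Notes on version B (the rewrite author's own statement) =====
-- stated objective: alternative
-- what changed: Replaces the single-pass dict of running per-char maxima by first deduplicating the characters and then rescanning the index range once per distinct character to find that character's maximum, summing the maxima with an explicit accumulator.
import Mathlib
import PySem

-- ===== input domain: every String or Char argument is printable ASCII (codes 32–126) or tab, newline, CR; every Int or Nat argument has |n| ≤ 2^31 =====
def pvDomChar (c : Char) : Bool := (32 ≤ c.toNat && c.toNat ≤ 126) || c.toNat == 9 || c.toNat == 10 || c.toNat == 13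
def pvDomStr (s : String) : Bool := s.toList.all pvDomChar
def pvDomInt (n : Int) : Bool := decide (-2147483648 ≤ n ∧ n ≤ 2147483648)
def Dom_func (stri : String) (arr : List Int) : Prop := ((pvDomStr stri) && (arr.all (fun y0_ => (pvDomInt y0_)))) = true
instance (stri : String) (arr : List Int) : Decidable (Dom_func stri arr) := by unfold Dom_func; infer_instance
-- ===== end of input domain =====

-- B replaces A's one-pass dict of running per-char maxima by deduplicating the characters
-- and rescanning the array once per distinct character; alternative decomposition, not faster.


-- ===== PORT A =====
def func (stri : String) (arr : List Int) : Int :=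
  let s := stri.toList
  let n : Int := (s.length : Int)
  let dic : PySem.Dict Char Int :=
    (PySem.List.pyRange 0 n 1).foldl (fun d i =>
      let c := PySem.List.pyGetD s i ' '
      if d.contains c then d.insert c (max (d.getD c 0) (PySem.List.pyGetD arr i 0))
      else d.insert c (PySem.List.pyGetD arr i 0)) PySem.Dict.empty
  arr.sum - dic.values.sum

-- ===== PORT B =====
def func_alt (stri : String) (arr : List Int) : Int :=
  let s := stri.toList
  let total := arr.sum
  let seen : List Char := s.foldl (fun acc c => if acc.contains c then acc else acc ++ [c]) []
  let best := seen.foldl (fun b c =>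
    let m : Option Int :=
      (PySem.List.pyRange 0 (s.length : Int) 1).foldl (fun m i =>
        if PySem.List.pyGetD s i ' ' == c then
          let v := PySem.List.pyGetD arr i 0
          match m with
          | none => some v
          | some mv => if v > mv then some v else m
        else m) none
    b + m.getD 0) 0
  total - best

-- ===== PRECONDITION & SPEC =====
-- Pre_: A raises IndexError on arr[i] exactly when arr is shorter than stri.
def Pre_func (stri : String) (arr : List Int) : Prop := stri.toList.length ≤ arr.length
instance (stri : String) (arr : List Int) : Decidable (Pre_func stri arr) := by unfold Pre_func; infer_instance
def pvWitness_func : String × List Int := ("aba", [1, 5, 2, 9])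

def Spec_func (stri : String) (arr : List Int) (out : Int) : Prop := out = func_alt stri arr
instance (stri : String) (arr : List Int) (out : Int) : Decidable (Spec_func stri arr out) := by unfold Spec_func; infer_instance

-- ===== CLAIM (what is proved, stated in full; the proofs are below) =====
def Claim_equal_func : Prop := ∀ (stri : String) (arr : List Int), Dom_func stri arr → Pre_func stri arr → Spec_func stri arr (func stri arr)

-- ===== LEMMAS AND PROOFS =====

-- Bridge: an index loop over range(len(s)) reading s[i] and arr[i] is a fold over zip s arr.
theorem foldl_range_two {β : Type} (g : β → Char → Int → β) :
    ∀ (s : List Char) (arr : List Int) (init : β), s.length ≤ arr.length →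
    (List.range s.length).foldl (fun x k => g x (s.getD k ' ') (arr.getD k 0)) init
      = (s.zip arr).foldl (fun x p => g x p.1 p.2) init := by
  intro s
  induction s with
  | nil => intro arr init _; simp
  | cons a s ih =>
    intro arr init h
    cases arr with
    | nil => simp at h
    | cons b arr =>
      simp only [List.length_cons]
      rw [List.range_succ_eq_map]
      simp only [List.foldl_cons, List.foldl_map, List.getD_cons_succ, List.getD_cons_zero,
        List.zip_cons_cons]
      exact ih arr (g init a b) (by simpa using h)

theorem foldl_pyRange_two {β : Type} (g : β → Char → Int → β)
    (s : List Char) (arr : List Int) (init : β) (h : s.length ≤ arr.length) :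
    (PySem.List.pyRange 0 (s.length : Int) 1).foldl
        (fun x i => g x (PySem.List.pyGetD s i ' ') (PySem.List.pyGetD arr i 0)) init
      = (s.zip arr).foldl (fun x p => g x p.1 p.2) init := by
  rw [PySem.List.pyRange_one]
  simp only [List.foldl_map, zero_add, Int.sub_zero, Int.toNat_natCast,
    PySem.List.pyGetD_natCast]
  exact foldl_range_two g s arr init h

-- the max-merge on an optional running maximum
def omax (m : Option Int) (v : Int) : Option Int :=
  match m with
  | none => some v
  | some x => some (max x v)

-- A's dict step, written as a single insert
def stepA (d : PySem.Dict Char Int) (p : Char × Int) : PySem.Dict Char Int :=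
  if d.contains p.1 then d.insert p.1 (max (d.getD p.1 0) p.2) else d.insert p.1 p.2

theorem stepA_eq_insert (d : PySem.Dict Char Int) (p : Char × Int) :
    stepA d p = d.insert p.1 (if d.contains p.1 then max (d.getD p.1 0) p.2 else p.2) := by
  unfold stepA; split_ifs <;> rfl

theorem get?_foldl_stepA :
    ∀ (ps : List (Char × Int)) (d : PySem.Dict Char Int) (c : Char),
    (ps.foldl stepA d).get? c
      = ((ps.filter (fun p => p.1 == c)).map (·.2)).foldl omax (d.get? c) := by
  intro ps
  induction ps with
  | nil => intro d c; rfl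
  | cons p ps ih =>
    intro d c
    rw [List.foldl_cons, ih]
    by_cases hc : p.1 = c
    · subst hc
      have hstep : (stepA d p).get? p.1 = omax (d.get? p.1) p.2 := by
        unfold stepA
        by_cases h : d.contains p.1
        · rw [if_pos h, PySem.Dict.get?_insert_self]
          rcases hs : d.get? p.1 with _ | x
          · rw [PySem.Dict.contains_eq_isSome_get?, hs] at h; simp at h
          · rw [PySem.Dict.getD_eq_get?_getD, hs]; rfl
        · rw [if_neg h, PySem.Dict.get?_insert_self]
          rcases hs : d.get? p.1 with _ | x
          · rfl
          · rw [PySem.Dict.contains_eq_isSome_get?, hs] at h; simp at h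
      simp only [List.filter_cons, BEq.rfl, if_true, List.map_cons, List.foldl_cons, hstep]
    · have hne : (p.1 == c) = false := by simpa using hc
      have hstep : (stepA d p).get? c = d.get? c := by
        rw [stepA_eq_insert, PySem.Dict.get?_insert_of_ne d _ (Ne.symm hc)]
      simp only [List.filter_cons, hne, if_false, Bool.false_eq_true, hstep]

-- B\'s inner scan over the zipped pairs is the same omax fold over the values at c
theorem innerB_eq_omax (ps : List (Char × Int)) (c : Char) :
    ps.foldl (fun m p => if p.1 == c then
        (match m with
         | none => some p.2
         | some mv => if p.2 > mv then some p.2 else m)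
      else m) (none : Option Int)
      = ((ps.filter (fun p => p.1 == c)).map (·.2)).foldl omax none := by
  have hcong : ∀ (m : Option Int) (p : Char × Int),
      (if p.1 == c then
        (match m with
         | none => some p.2
         | some mv => if p.2 > mv then some p.2 else m)
      else m) = (if p.1 == c then omax m p.2 else m) := by
    intro m p
    rcases m with _ | x
    · rfl
    · by_cases h : p.1 == c
      · simp only [h, if_true, omax]
        by_cases hv : p.2 > x
        · rw [if_pos hv]; congr 1; omega
        · rw [if_neg hv]; congr 1; omega
      · simp [h]
  calc ps.foldl (fun m p => if p.1 == c then
        (match m with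
         | none => some p.2
         | some mv => if p.2 > mv then some p.2 else m)
      else m) none
      = ps.foldl (fun m p => if p.1 == c then omax m p.2 else m) none :=
        PySem.List.foldl_congr_mem _ _ _ _ (fun m p _ => hcong m p)
    _ = (ps.filter (fun p => p.1 == c)).foldl (fun m p => omax m p.2) none := by
        rw [PySem.List.foldl_if_eq_foldl_filter]
    _ = ((ps.filter (fun p => p.1 == c)).map (·.2)).foldl omax none := by
        rw [List.foldl_map]

-- ===== VERDICT (by name: the statement is the Claim_ definition above) =====
theorem func_spec : Claim_equal_func := by
  intro stri arr _ hpre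
  unfold Spec_func func func_alt
  simp only []
  set s := stri.toList with hs
  have hlen : s.length ≤ arr.length := hpre
  -- rewrite A\'s loop as a fold over zip
  rw [foldl_pyRange_two (fun d c v =>
    if PySem.Dict.contains d c then PySem.Dict.insert d c (max (PySem.Dict.getD d c 0) v)
    else PySem.Dict.insert d c v) s arr PySem.Dict.empty hlen]
  have hAfold : (s.zip arr).foldl (fun (d : PySem.Dict Char Int) p =>
      if d.contains p.1 then d.insert p.1 (max (d.getD p.1 0) p.2) else d.insert p.1 p.2)
      PySem.Dict.empty = (s.zip arr).foldl stepA PySem.Dict.empty := rfl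
  rw [hAfold]
  -- dict keys are the deduped characters, in order
  have hkeys : ((s.zip arr).foldl stepA PySem.Dict.empty).keys = PySem.Set.ofList s := by
    have h1 : (s.zip arr).foldl stepA PySem.Dict.empty
        = (s.zip arr).foldl (fun d p => d.insert p.1
            (if d.contains p.1 then max (d.getD p.1 0) p.2 else p.2)) PySem.Dict.empty :=
      PySem.List.foldl_congr_mem _ _ _ _ (fun d p _ => stepA_eq_insert d p)
    rw [h1, PySem.Dict.keys_foldl_insert_key, PySem.Dict.keys_empty,
      List.map_fst_zip hlen]
    rfl
  have hnd : ((s.zip arr).foldl stepA PySem.Dict.empty).keys.Nodup := by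
    rw [hkeys]; exact PySem.Set.nodup_ofList s
  -- B\'s seen list is set(s) in first-occurrence order
  have hseen : s.foldl (fun acc c => if acc.contains c then acc else acc ++ [c]) [] =
      PySem.Set.ofList s := rfl
  rw [hseen]
  -- dict values as a map over its keys; B\'s outer loop as a sum
  rw [PySem.Dict.values_eq_map_keys _ hnd 0, hkeys, PySem.List.foldl_add, zero_add]
  congr 2
  apply List.map_congr_left
  intro c _
  rw [foldl_pyRange_two (fun m ch v =>
    if ch == c then
      (match m with
       | none => some v
       | some mv => if v > mv then some v else m)
    else m) s arr none hlen]
  rw [innerB_eq_omax]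
  rw [PySem.Dict.getD_eq_get?_getD, get?_foldl_stepA, PySem.Dict.get?_empty]
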